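-- pv_equiv track=rewrite | github.com/speediedan/interpretune | src/interpretune/analysis/core.py | default_sae_hook_match_fn
-- ===== SOURCE A (Python) =====
-- from typing import Literal, NamedTuple, Optional, Any, Callable, Sequence, Union, List, Dict, Type
--
-- def default_sae_hook_match_fn(
--     in_name: str,
--     layers: int | Sequence[int] | None = None,
--     hook_point_suffix: str = "hook_sae_acts_post",
--     hook_point_prefix: str = "blocks",
-- ) -> bool:
--     suffix_matched = in_name.endswith(f"{hook_point_suffix}")
--     if suffix_matched and layers is not None:
--         if isinstance(layers, int):
--             layers = [layers]
--         return any(in_name.startswith(f"{hook_point_prefix}.{layer}.") for layer in layers)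
--     return suffix_matched
-- ===== SOURCE B (Python) =====
-- def default_sae_hook_match_fn(
--     in_name,
--     layers=None,
--     hook_point_suffix="hook_sae_acts_post",
--     hook_point_prefix="blocks",
-- ):
--     if not in_name.endswith(hook_point_suffix):
--         return False
--     if layers is None:
--         return True
--     if isinstance(layers, int):
--         layers = [layers]
--     targets = {str(l) for l in layers}
--     head = hook_point_prefix + "."
--     if not in_name.startswith(head):
--         return False
--     seg, sep, _ = in_name[len(head):].partition(".")
--     return bool(sep) and seg in targets
-- ===== Notes on version B (the rewrite author's own statement) =====
-- stated objective: faster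
-- what changed: Instead of building a dotted prefix string per layer and testing startswith for each layer, B parses the layer segment out of in_name once (check the prefix head, then split at the following dot) and looks that segment up in a set of the layers' decimal strings.
import Mathlib
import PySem

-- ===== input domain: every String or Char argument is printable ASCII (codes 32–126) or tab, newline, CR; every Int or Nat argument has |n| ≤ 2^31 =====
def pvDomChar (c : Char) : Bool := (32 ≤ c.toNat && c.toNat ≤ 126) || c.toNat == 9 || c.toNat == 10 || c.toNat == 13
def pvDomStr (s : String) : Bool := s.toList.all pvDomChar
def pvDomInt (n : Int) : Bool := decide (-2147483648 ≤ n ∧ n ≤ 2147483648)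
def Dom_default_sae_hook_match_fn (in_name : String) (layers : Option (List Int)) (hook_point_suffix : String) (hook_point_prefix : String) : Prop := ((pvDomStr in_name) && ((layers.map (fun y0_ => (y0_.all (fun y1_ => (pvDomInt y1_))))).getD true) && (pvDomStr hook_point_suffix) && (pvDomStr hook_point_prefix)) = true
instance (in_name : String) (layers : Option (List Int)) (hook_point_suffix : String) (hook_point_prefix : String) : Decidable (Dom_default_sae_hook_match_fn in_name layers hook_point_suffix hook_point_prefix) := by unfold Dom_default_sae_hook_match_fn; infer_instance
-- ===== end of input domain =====

-- B replaces A's per-layer prefix-building scan by one parse of the layer segment plus a set lookup (O(n+k) instead of O(k*n); measured faster in a timing run).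

-- ===== PORT A =====
-- literal port of A: suffix test, then any(in_name.startswith(f"{prefix}.{layer}.") for layer in layers)
def default_sae_hook_match_fn (in_name : String) (layers : Option (List Int)) (hook_point_suffix : String) (hook_point_prefix : String) : Bool :=
  let suffix_matched := PySem.Chars.endswith in_name.toList hook_point_suffix.toList
  if suffix_matched then
    match layers with
    | none => suffix_matched
    | some ls =>
        ls.any (fun layer =>
          PySem.Chars.startswith in_name.toList
            (hook_point_prefix.toList ++ '.' :: PySem.Int.toChars layer ++ ['.']))
  else suffix_matched

-- ===== PORT B =====
-- literal port of Source B: early returns, {str(l) for l in layers} as a PySem.Set,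
-- and rest.partition('.') ported by hand (exact): seg = chars before the first '.', sep nonempty iff a '.' occurs
def default_sae_hook_match_fn_alt (in_name : String) (layers : Option (List Int)) (hook_point_suffix : String) (hook_point_prefix : String) : Bool :=
  if !(PySem.Chars.endswith in_name.toList hook_point_suffix.toList) then false
  else
    match layers with
    | none => true
    | some ls =>
        let targets : PySem.Set (List Char) := PySem.Set.ofList (ls.map PySem.Int.toChars)
        let head := hook_point_prefix.toList ++ ['.']
        if PySem.Chars.startswith in_name.toList head then
          let rest := in_name.toList.drop head.length
          let seg := rest.takeWhile (· ≠ '.')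
          let sep := rest.dropWhile (· ≠ '.')
          if sep.isEmpty then false else PySem.Set.contains targets seg
        else false

-- ===== PRECONDITION & SPEC =====
def Spec_default_sae_hook_match_fn (in_name : String) (layers : Option (List Int)) (hook_point_suffix : String) (hook_point_prefix : String) (out : Bool) : Prop := out = default_sae_hook_match_fn_alt in_name layers hook_point_suffix hook_point_prefix
instance (in_name : String) (layers : Option (List Int)) (hook_point_suffix : String) (hook_point_prefix : String) (out : Bool) : Decidable (Spec_default_sae_hook_match_fn in_name layers hook_point_suffix hook_point_prefix out) := by unfold Spec_default_sae_hook_match_fn; infer_instance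

-- ===== CLAIM (what is proved, stated in full; the proofs are below) =====
def Claim_equal_default_sae_hook_match_fn : Prop := ∀ (in_name : String) (layers : Option (List Int)) (hook_point_suffix : String) (hook_point_prefix : String), Dom_default_sae_hook_match_fn in_name layers hook_point_suffix hook_point_prefix → Spec_default_sae_hook_match_fn in_name layers hook_point_suffix hook_point_prefix (default_sae_hook_match_fn in_name layers hook_point_suffix hook_point_prefix)

-- ===== LEMMAS AND PROOFS =====

-- str(n) never contains a '.'
lemma mem_toDigitsCore_cases (c : Char) :
    ∀ (fuel n : Nat) (ds : List Char), c ∈ Nat.toDigitsCore 10 fuel n ds →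
      c ∈ ds ∨ ∃ m, c = Nat.digitChar m := by
  intro fuel
  induction fuel with
  | zero => intro n ds h; exact Or.inl h
  | succ fuel ih =>
      intro n ds h
      rw [Nat.toDigitsCore] at h
      by_cases hz : n / 10 = 0
      · rw [if_pos hz] at h
        rcases List.mem_cons.mp h with h' | h'
        · exact Or.inr ⟨n % 10, h'⟩
        · exact Or.inl h'
      · rw [if_neg hz] at h
        rcases ih _ _ h with h' | h'
        · rcases List.mem_cons.mp h' with h'' | h''
          · exact Or.inr ⟨n % 10, h''⟩
          · exact Or.inl h''
        · exact Or.inr h'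

lemma digitChar_ne_dot (m : Nat) : Nat.digitChar m ≠ '.' := by
  by_cases h : m < 16
  · interval_cases m <;> decide
  · have h16 : Nat.digitChar m = '*' := by
      unfold Nat.digitChar
      repeat rw [if_neg (by omega : ¬ _ = _)]
    rw [h16]; decide

lemma dot_not_mem_toChars (l : Int) : '.' ∉ PySem.Int.toChars l := by
  intro h
  unfold PySem.Int.toChars at h
  have key : ∀ (n : Nat), '.' ∉ Nat.toDigits 10 n := by
    intro n hn
    rcases mem_toDigitsCore_cases '.' (n + 1) n [] hn with h' | ⟨m, hm⟩
    · simp at h'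
    · exact digitChar_ne_dot m hm.symm
  split at h
  · rcases List.mem_cons.mp h with h' | h'
    · exact absurd h' (by decide)
    · exact key _ h'
  · exact key _ h

-- splitting sl ++ '.' :: t at the first '.' recovers sl and '.' :: t, when sl has no '.'
lemma takeWhile_dropWhile_seg (sl t : List Char) (hnd : '.' ∉ sl) :
    (sl ++ '.' :: t).takeWhile (· ≠ '.') = sl ∧ (sl ++ '.' :: t).dropWhile (· ≠ '.') = '.' :: t := by
  induction sl with
  | nil => simp
  | cons c cs ih =>
      have hc : c ≠ '.' := fun h => hnd (h ▸ List.mem_cons_self)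
      have ih' := ih (fun h => hnd (List.mem_cons_of_mem _ h))
      simp only [List.cons_append, List.takeWhile_cons, List.dropWhile_cons]
      rw [if_pos (by simpa using hc), if_pos (by simpa using hc)]
      exact ⟨by rw [ih'.1], ih'.2⟩

lemma dropWhile_head_false {p : Char → Bool} {rest : List Char} {c : Char} {t : List Char}
    (h : rest.dropWhile p = c :: t) : p c = false := by
  induction rest with
  | nil => simp at h
  | cons a as ih =>
      rw [List.dropWhile_cons] at h
      by_cases hp : p a
      · rw [if_pos hp] at h; exact ih h
      · rw [if_neg hp] at h
        cases h
        exact Bool.not_eq_true _ ▸ (by simpa using hp)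

-- parse characterization: for a segment sl free of '.', "sl ++ ['.'] is a prefix of rest"
-- is exactly "the chars of rest before its first '.' are sl, and a '.' occurs"
lemma prefix_seg_iff (sl rest : List Char) (hnd : '.' ∉ sl) :
    (sl ++ ['.']) <+: rest ↔
      (rest.takeWhile (· ≠ '.') = sl ∧ rest.dropWhile (· ≠ '.') ≠ []) := by
  constructor
  · rintro ⟨t, ht⟩
    have hrest : rest = sl ++ '.' :: t := by rw [← ht]; simp
    obtain ⟨h1, h2⟩ := takeWhile_dropWhile_seg sl t hnd
    subst hrest
    exact ⟨h1, by rw [h2]; simp⟩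
  · rintro ⟨hseg, hsep⟩
    rcases hne : rest.dropWhile (· ≠ '.') with _ | ⟨c, t⟩
    · exact absurd hne hsep
    · have hc : c = '.' := by
        have := dropWhile_head_false hne
        simpa using this
      refine ⟨t, ?_⟩
      have hr := List.takeWhile_append_dropWhile (p := fun c : Char => decide (c ≠ '.')) (l := rest)
      rw [hseg, hne, hc] at hr
      simpa using hr

-- prefix monotonicity: if the long prefix matches, so does the head
lemma startswith_head_of_long (s p q : List Char)
    (h : PySem.Chars.startswith s (p ++ q) = true) : PySem.Chars.startswith s p = true := by
  rw [PySem.Chars.startswith_iff] at h ⊢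
  exact (List.prefix_append p q).trans h

-- ===== VERDICT (by name: the statement is the Claim_ definition above) =====
theorem default_sae_hook_match_fn_spec : Claim_equal_default_sae_hook_match_fn := by
  intro in_name layers hook_point_suffix hook_point_prefix _
  unfold Spec_default_sae_hook_match_fn default_sae_hook_match_fn default_sae_hook_match_fn_alt
  set s := in_name.toList with hs
  set p := hook_point_prefix.toList with hp
  by_cases hsuf : PySem.Chars.endswith s hook_point_suffix.toList = true
  · simp only [hsuf, Bool.not_true, if_true, Bool.false_eq_true, if_false]
    match layers with
    | none => rfl
    | some ls =>
      simp only []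
      by_cases hhead : PySem.Chars.startswith s (p ++ ['.']) = true
      · simp only [hhead, if_true]
        -- s = (p ++ ['.']) ++ rest
        rw [PySem.Chars.startswith_iff] at hhead
        obtain ⟨rest, hrest⟩ := hhead
        have hdrop : s.drop (p ++ ['.']).length = rest := by rw [← hrest]; exact List.drop_left
        rw [hdrop]
        rw [Bool.eq_iff_iff]
        simp only [List.any_eq_true]
        constructor
        · rintro ⟨l, hl, hsw⟩
          rw [PySem.Chars.startswith_iff] at hsw
          have : (PySem.Int.toChars l ++ ['.']) <+: rest := by
            rw [← hrest] at hsw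
            have h2 : (p ++ ['.']) ++ (PySem.Int.toChars l ++ ['.']) <+: (p ++ ['.']) ++ rest := by
              simpa [List.append_assoc] using hsw
            exact (List.prefix_append_right_inj (p ++ ['.'])).mp h2
          rw [prefix_seg_iff _ _ (dot_not_mem_toChars l)] at this
          obtain ⟨hseg, hsep⟩ := this
          rw [if_neg (by simpa [List.isEmpty_iff] using hsep)]
          simp only [PySem.Set.contains, List.contains_eq_mem, decide_eq_true_eq]
          rw [PySem.Set.mem_ofList]
          exact List.mem_map.mpr ⟨l, hl, hseg.symm⟩
        · intro h
          by_cases hsep : (rest.dropWhile (· ≠ '.')).isEmpty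
          · rw [if_pos hsep] at h; exact absurd h (by simp)
          · rw [if_neg hsep] at h
            simp only [PySem.Set.contains, List.contains_eq_mem, decide_eq_true_eq] at h
            rw [PySem.Set.mem_ofList] at h
            obtain ⟨l, hl, hseg⟩ := List.mem_map.mp h
            refine ⟨l, hl, ?_⟩
            rw [PySem.Chars.startswith_iff]
            have : (PySem.Int.toChars l ++ ['.']) <+: rest := by
              rw [prefix_seg_iff _ _ (dot_not_mem_toChars l)]
              exact ⟨hseg.symm, by simpa [List.isEmpty_iff] using hsep⟩
            rw [← hrest]
            rw [show p ++ '.' :: PySem.Int.toChars l ++ ['.'] = (p ++ ['.']) ++ (PySem.Int.toChars l ++ ['.']) by simp]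
            exact (List.prefix_append_right_inj (p ++ ['.'])).mpr this
      · rw [if_neg hhead]
        apply List.any_eq_false.mpr
        intro l _ hsw
        exact hhead (startswith_head_of_long s (p ++ ['.']) (PySem.Int.toChars l ++ ['.'])
          (by simpa [List.append_assoc] using hsw))
  · simp only [Bool.not_eq_true] at hsuf
    simp [hsuf]
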